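-- pv_equiv track=rewrite | github.com/joshanashakya/dissertation | workspace/dataset/java-python/GeeksForGeeks/4036/A/2.py | check
-- ===== SOURCE A (Python) =====
-- def check(s, l):
--
--     # Initialize vector to store
--     # the position of 1's
--     pos = []
--
--     for i in range(l):
--
--         # Store the positions of 1's
--         if (s[i] == '1'):
--             pos.append(i)
--
--     # Size of the position vector
--     t = len(pos)
--     for i in range(1, t):
--
--         # If condition isn't satisfied
--         if ((pos[i] -
--              pos[i - 1]) != (pos[1] -
--                              pos[0])):
--             return False
--
--     return True
-- ===== SOURCE B (Python) =====
-- def check(s, l):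
--     # Fewer than two scanned characters: at most one '1', trivially equally spaced.
--     if l < 2:
--         return True
--     # The '1's are equally spaced iff the segments BETWEEN consecutive '1's
--     # (the inner pieces of splitting on '1') all have the same length.
--     parts = s[:l].split('1')
--     return len(set(map(len, parts[1:-1]))) <= 1
-- ===== Notes on version B (the rewrite author's own statement) =====
-- stated objective: simpler
-- what changed: Replaces A's position-list collection and gap-comparison loops with a string-splitting formulation: split the scanned prefix on '1' and test whether the segments between consecutive '1's all share one length (a one-element set of lengths).
-- outside the precondition, e.g. on check('01', 3): A raises IndexError, B returns True
import Mathlib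
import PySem

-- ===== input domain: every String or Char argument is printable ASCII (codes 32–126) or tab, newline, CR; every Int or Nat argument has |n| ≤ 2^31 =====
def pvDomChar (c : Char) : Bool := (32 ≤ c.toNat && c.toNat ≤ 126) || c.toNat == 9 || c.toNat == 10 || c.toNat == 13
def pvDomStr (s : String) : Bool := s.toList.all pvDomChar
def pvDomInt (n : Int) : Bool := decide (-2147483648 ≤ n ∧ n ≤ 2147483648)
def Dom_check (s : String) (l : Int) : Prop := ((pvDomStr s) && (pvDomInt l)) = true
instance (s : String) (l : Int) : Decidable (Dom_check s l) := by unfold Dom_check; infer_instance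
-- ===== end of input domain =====

-- B drops the position list and the gap arithmetic entirely: it splits the scanned prefix on '1'
-- and answers whether the segments BETWEEN consecutive '1's all have one length (simpler).

-- ===== PORT A =====
-- A's second loop: 'for i in range(1, t): if pos[i]-pos[i-1] != pos[1]-pos[0]: return False'
def checkLoopA (pos : List Int) : List Int → Bool
  | [] => true
  | i :: rest =>
    if PySem.List.pyGetD pos i 0 - PySem.List.pyGetD pos (i - 1) 0 ≠
        PySem.List.pyGetD pos 1 0 - PySem.List.pyGetD pos 0 0 then false
    else checkLoopA pos rest

def check (s : String) (l : Int) : Bool :=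
  let cs := s.toList
  let pos := (PySem.List.pyRange 0 l 1).foldl
    (fun acc i => if PySem.List.pyGetD cs i ' ' = '1' then acc ++ [i] else acc) []
  let t := pos.length
  checkLoopA pos (PySem.List.pyRange 1 (t : Int) 1)

-- ===== PORT B =====
def check_alt (s : String) (l : Int) : Bool :=
  if l < 2 then true
  else
    let parts := PySem.Chars.splitOn (PySem.List.slice s.toList none (some l)) ['1']
    let inner := PySem.List.slice parts (some 1) (some (-1))
    decide ((PySem.Set.ofList (inner.map (fun p => (p.length : Int)))).length ≤ 1)

-- ===== PRECONDITION & SPEC =====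
-- Pre_ excludes l > len(s), where Python A raises IndexError while collecting positions.
def Pre_check (s : String) (l : Int) : Prop := l ≤ (s.toList.length : Int)
instance (s : String) (l : Int) : Decidable (Pre_check s l) := by unfold Pre_check; infer_instance
def pvWitness_check : String × Int := ("10101", 5)

def Spec_check (s : String) (l : Int) (out : Bool) : Prop := out = check_alt s l
instance (s : String) (l : Int) (out : Bool) : Decidable (Spec_check s l out) := by unfold Spec_check; infer_instance

-- ===== CLAIM (what is proved, stated in full; the proofs are below) =====
def Claim_equal_check : Prop := ∀ (s : String) (l : Int), Dom_check s l → Pre_check s l → Spec_check s l (check s l)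

-- ===== LEMMAS AND PROOFS =====

-- indices of the '1' characters
def onesIdx (u : List Char) : List Nat :=
  (List.range u.length).filter (fun i => u.getD i ' ' == '1')

-- consecutive differences
def diffs : List Nat → List Nat
  | a :: b :: rest => (b - a) :: diffs (b :: rest)
  | _ => []

-- every element equals the first
def allSame : List Nat → Bool
  | [] => true
  | d :: ds => ds.all (· == d)

def pairwiseEq {α : Type} (xs : List α) : Prop := ∀ a ∈ xs, ∀ b ∈ xs, a = b

-- structural recursion computing str.split('1')
def mySplit : List Char → List (List Char)
  | [] => [[]]
  | c :: t =>
    if c = '1' then [] :: mySplit t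
    else match mySplit t with
      | [] => [[c]]
      | h :: r => (c :: h) :: r

def headmod (pre : List Char) : List (List Char) → List (List Char)
  | [] => [pre]
  | h :: r => (pre ++ h) :: r

-- positions of the '1's given the segment decomposition, starting at offset k
def posOf : Nat → List (List Char) → List Nat
  | _, [] => []
  | _, [_] => []
  | k, seg :: rest => (k + seg.length) :: posOf (k + seg.length + 1) rest

-- all consecutive gaps, starting from previous element p, equal g (A's test, Int side)
def allEq (g : Int) : Int → List Int → Bool
  | _, [] => true
  | p, x :: xs => (x - p == g) && allEq g x xs

theorem loopA_eq_all (pos : List Int) (idxs : List Int) :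
    checkLoopA pos idxs = idxs.all (fun i => decide
      (PySem.List.pyGetD pos i 0 - PySem.List.pyGetD pos (i - 1) 0 =
        PySem.List.pyGetD pos 1 0 - PySem.List.pyGetD pos 0 0)) := by
  induction idxs with
  | nil => rfl
  | cons i rest ih =>
    simp only [checkLoopA, List.all_cons, ih]
    by_cases h : PySem.List.pyGetD pos i 0 - PySem.List.pyGetD pos (i - 1) 0 =
        PySem.List.pyGetD pos 1 0 - PySem.List.pyGetD pos 0 0 <;> simp [h]

theorem rangeAll (g : Int) : ∀ (l pre : List Int) (p : Int),
    ((PySem.List.pyRange ((pre.length : Int) + 1) ((pre.length : Int) + 1 + l.length) 1).all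
      (fun i => decide (PySem.List.pyGetD (pre ++ p :: l) i 0 -
        PySem.List.pyGetD (pre ++ p :: l) (i - 1) 0 = g))) = allEq g p l := by
  intro l
  induction l with
  | nil =>
    intro pre p
    rw [PySem.List.pyRange_one_eq_nil (by simp only [List.length_nil, Nat.cast_zero, add_zero]; exact le_refl _)]
    rfl
  | cons x xs ih =>
    intro pre p
    rw [PySem.List.pyRange_one_cons (by simp only [List.length_cons]; push_cast; omega)]
    have h1 : PySem.List.pyGetD (pre ++ p :: x :: xs) ((pre.length : Int) + 1) 0 = x := by
      have : ((pre.length : Int) + 1) = ((pre.length + 1 : Nat) : Int) := by push_cast; ring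
      rw [this, PySem.List.pyGetD_natCast]
      simp [List.getD]
    have h2 : PySem.List.pyGetD (pre ++ p :: x :: xs) ((pre.length : Int) + 1 - 1) 0 = p := by
      have : ((pre.length : Int) + 1 - 1) = ((pre.length : Nat) : Int) := by ring
      rw [this, PySem.List.pyGetD_natCast]
      simp [List.getD]
    have hrest := ih (pre ++ [p]) x
    have hlen : ((pre ++ [p]).length : Int) + 1 = (pre.length : Int) + 1 + 1 := by
      simp
    have hassoc : (pre ++ [p]) ++ x :: xs = pre ++ p :: x :: xs := by simp
    rw [hlen, hassoc] at hrest
    have hbound : (pre.length : Int) + 1 + 1 + (xs.length : Int) =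
        (pre.length : Int) + 1 + ((x :: xs).length : Int) := by push_cast [List.length_cons]; ring
    rw [hbound] at hrest
    simp only [List.all_cons, hrest, h1, h2, allEq]
    by_cases h : x - p = g <;> simp [h]

-- A's second loop on pos = p0::p1::rest is the all-gaps-equal test
theorem chainA_cons (p0 p1 : Int) (rest : List Int) :
    checkLoopA (p0 :: p1 :: rest) (PySem.List.pyRange 1 ((p0 :: p1 :: rest).length : Int) 1) =
      allEq (p1 - p0) p0 (p1 :: rest) := by
  rw [loopA_eq_all]
  have hg1 : PySem.List.pyGetD (p0 :: p1 :: rest) 1 0 = p1 := by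
    simp [PySem.List.pyGetD, PySem.List.pyGet?, PySem.List.pyIdx?]
  have hg0 : PySem.List.pyGetD (p0 :: p1 :: rest) 0 0 = p0 := PySem.List.pyGetD_zero_cons _ _ _
  have hkey := rangeAll (p1 - p0) (p1 :: rest) [] p0
  simp only [List.length_nil, Nat.cast_zero, List.nil_append, zero_add] at hkey
  have hlen : ((p0 :: p1 :: rest).length : Int) = 1 + ((p1 :: rest).length : Int) := by
    push_cast [List.length_cons]; ring
  rw [hg1, hg0, hlen]
  exact hkey

-- A's test over cast positions is allSame of the Nat diffs
theorem allEq_cast (g : Nat) : ∀ (xs : List Nat) (p : Nat), (p :: xs).Pairwise (· < ·) →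
    allEq (g : Int) (p : Int) (xs.map (Nat.cast)) = (diffs (p :: xs)).all (· == g) := by
  intro xs
  induction xs with
  | nil => intro p _; rfl
  | cons x xs ih =>
    intro p hs
    have hpx : p < x := (List.pairwise_cons.mp hs).1 x (by simp)
    have hs' : (x :: xs).Pairwise (· < ·) := (List.pairwise_cons.mp hs).2
    simp only [List.map_cons, allEq, diffs, List.all_cons, ih x hs']
    congr 1
    have hcast : (x : Int) - (p : Int) = ((x - p : Nat) : Int) := by
      push_cast [Nat.cast_sub (le_of_lt hpx)]; ring
    rw [hcast]
    by_cases h : x - p = g <;> simp [h]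

theorem onesIdx_cons (c : Char) (t : List Char) :
    onesIdx (c :: t) = (if c = '1' then [0] else []) ++ (onesIdx t).map (· + 1) := by
  unfold onesIdx
  rw [List.length_cons, List.range_succ_eq_map, List.filter_cons, List.filter_map]
  rw [List.filter_congr (fun i _ => by
    show ((fun i => (c :: t).getD i ' ' == '1') ∘ Nat.succ) i = (fun i => t.getD i ' ' == '1') i
    simp [Function.comp, List.getD])]
  have hmap : (List.filter (fun i => t.getD i ' ' == '1') (List.range t.length)).map Nat.succ
      = ((List.range t.length).filter (fun i => t.getD i ' ' == '1')).map (· + 1) := by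
    simp
  rw [hmap]
  by_cases h : c = '1' <;> simp [h, List.getD]

theorem onesIdx_sorted (u : List Char) : (onesIdx u).Pairwise (· < ·) := by
  exact List.Pairwise.sublist List.filter_sublist List.pairwise_lt_range

theorem mySplit_ne_nil (u : List Char) : mySplit u ≠ [] := by
  cases u with
  | nil => simp [mySplit]
  | cons c t =>
    simp only [mySplit]
    split
    · simp
    · cases h : mySplit t <;> simp

theorem splitOn_go_spec (fuel : Nat) : ∀ (l cur : List Char) (acc : List (List Char)),
    l.length ≤ fuel →
    PySem.Chars.splitOn.go ['1'] fuel l cur acc = acc.reverse ++ headmod cur.reverse (mySplit l) := by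
  induction fuel with
  | zero =>
    intro l cur acc h
    have hl : l = [] := by cases l with | nil => rfl | cons a b => simp at h
    subst hl
    simp [PySem.Chars.splitOn.go, mySplit, headmod]
  | succ fuel ih =>
    intro l cur acc h
    cases l with
    | nil => simp [PySem.Chars.splitOn.go, mySplit, headmod]
    | cons c rest =>
      by_cases hc : c = '1'
      · subst hc
        have hpre : ['1'].isPrefixOf ('1' :: rest) = true := by simp [List.isPrefixOf]
        rw [PySem.Chars.splitOn.go.eq_def]
        simp only [hpre, if_true]
        rw [ih _ _ _ (by simpa using Nat.le_of_succ_le_succ (by simpa using h))]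
        rcases hM : mySplit rest with _ | ⟨hd, r⟩
        · exact absurd hM (mySplit_ne_nil rest)
        · simp [mySplit, headmod, hM]
      · have hpre : ['1'].isPrefixOf (c :: rest) = false := by
          have : ¬ ('1' = c) := fun h => hc h.symm
          simp [List.isPrefixOf, this]
        rw [PySem.Chars.splitOn.go.eq_def]
        simp only [hpre, Bool.false_eq_true, if_false]
        rw [ih _ _ _ (by simpa using Nat.le_of_succ_le_succ (by simpa using h))]
        rcases hM : mySplit rest with _ | ⟨hd, r⟩
        · exact absurd hM (mySplit_ne_nil rest)
        · simp [mySplit, headmod, hM, hc]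

theorem splitOn_eq_mySplit (u : List Char) : PySem.Chars.splitOn u ['1'] = mySplit u := by
  unfold PySem.Chars.splitOn
  rw [show u.length + 1 = u.length + 1 from rfl, splitOn_go_spec (u.length + 1) u [] [] (by omega)]
  rcases hM : mySplit u with _ | ⟨hd, r⟩
  · exact absurd hM (mySplit_ne_nil u)
  · simp [headmod]

theorem posOf_shift (k : Nat) : ∀ (segs : List (List Char)) (j : Nat),
    posOf (k + j) segs = (posOf j segs).map (k + ·) := by
  intro segs
  induction segs with
  | nil => intro j; rfl
  | cons seg rest ih =>
    intro j
    cases rest with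
    | nil => rfl
    | cons s2 r2 =>
      simp only [posOf, List.map_cons, List.cons.injEq]
      constructor
      · omega
      · have := ih (j + seg.length + 1)
        rw [show k + j + seg.length + 1 = k + (j + seg.length + 1) by omega, this]

theorem posOf_succ (segs : List (List Char)) (j : Nat) :
    posOf (j + 1) segs = (posOf j segs).map (· + 1) := by
  have h := posOf_shift 1 segs j
  rw [show 1 + j = j + 1 by omega] at h
  rw [h]
  exact List.map_congr_left (fun x _ => by omega)

theorem onesIdx_eq_posOf (u : List Char) : onesIdx u = posOf 0 (mySplit u) := by
  induction u with
  | nil => rfl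
  | cons c t ih =>
    rw [onesIdx_cons, ih]
    by_cases hc : c = '1'
    · subst hc
      rw [if_pos rfl, show mySplit ('1' :: t) = [] :: mySplit t from by simp [mySplit]]
      rcases hM : mySplit t with _ | ⟨h, r⟩
      · exact absurd hM (mySplit_ne_nil t)
      · have hp := posOf_succ (h :: r) 0
        norm_num at hp
        simp [posOf, hp]
    · rw [if_neg hc]
      have hM' : ∀ h r, mySplit t = h :: r → mySplit (c :: t) = (c :: h) :: r := by
        intro h r hM
        simp [mySplit, if_neg hc, hM]
      rcases hM : mySplit t with _ | ⟨h, r⟩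
      · exact absurd hM (mySplit_ne_nil t)
      · rw [hM' h r hM]
        rcases r with _ | ⟨r0, r'⟩
        · simp [posOf]
        · simp only [posOf, List.map_cons, List.cons.injEq, List.length_cons, List.nil_append]
          refine ⟨by omega, ?_⟩
          have hp := posOf_succ (r0 :: r') (0 + h.length + 1)
          rw [← hp]
          congr 1

theorem diffs_posOf : ∀ (segs : List (List Char)) (k : Nat),
    diffs (posOf k segs) = (segs.tail.dropLast).map (fun sg => sg.length + 1) := by
  intro segs
  induction segs with
  | nil => intro k; rfl
  | cons seg rest ih =>
    intro k
    cases rest with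
    | nil => rfl
    | cons s2 r2 =>
      cases r2 with
      | nil => rfl
      | cons s3 r3 =>
        simp only [posOf, diffs, List.tail_cons]
        rw [List.dropLast_cons_of_ne_nil (by simp), List.map_cons]
        simp only [List.cons.injEq]
        constructor
        · omega
        · have := ih (k + seg.length + 1)
          simp only [posOf, List.tail_cons] at this
          exact this

theorem slice_one_negone {α : Type} (xs : List α) :
    PySem.List.slice xs (some 1) (some (-1)) = xs.tail.dropLast := by
  cases xs with
  | nil => rfl
  | cons x t =>
    simp only [PySem.List.slice, PySem.List.clampIdx]
    norm_num
    rw [if_neg (by omega), List.dropLast_eq_take]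

theorem setLen_le_one_iff {α : Type} [BEq α] [LawfulBEq α] (xs : List α) :
    (PySem.Set.ofList xs).length ≤ 1 ↔ pairwiseEq xs := by
  constructor
  · intro h a ha b hb
    have ha' := (PySem.Set.mem_ofList xs a).mpr ha
    have hb' := (PySem.Set.mem_ofList xs b).mpr hb
    rcases hS : PySem.Set.ofList xs with _ | ⟨y, _ | ⟨z, zs⟩⟩
    · rw [hS] at ha'; simp at ha'
    · rw [hS] at ha' hb'
      simp only [List.mem_singleton] at ha' hb'
      rw [ha', hb']
    · rw [hS] at h; simp at h
  · intro h
    rcases hS : PySem.Set.ofList xs with _ | ⟨y, _ | ⟨z, zs⟩⟩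
    · simp
    · simp
    · exfalso
      have hy := (PySem.Set.mem_ofList xs y).mp (by rw [hS]; simp)
      have hz := (PySem.Set.mem_ofList xs z).mp (by rw [hS]; simp)
      have hnd := PySem.Set.nodup_ofList xs
      rw [hS] at hnd
      have := List.pairwise_cons.mp hnd
      exact this.1 z (by simp) (h y hy z hz)

theorem pairwiseEq_map {α β : Type} (f : α → β) (L : List α) :
    pairwiseEq (L.map f) ↔ ∀ a ∈ L, ∀ b ∈ L, f a = f b := by
  simp [pairwiseEq]

theorem allSame_iff (ys : List Nat) : allSame ys = true ↔ pairwiseEq ys := by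
  cases ys with
  | nil => simp [allSame, pairwiseEq]
  | cons d ds =>
    simp only [allSame, List.all_eq_true, beq_iff_eq, pairwiseEq]
    constructor
    · intro h a ha b hb
      rcases List.mem_cons.mp ha with h1 | h1 <;> rcases List.mem_cons.mp hb with h2 | h2
      · rw [h1, h2]
      · rw [h1, h b h2]
      · rw [h a h1, h2]
      · rw [h a h1, h b h2]
    · intro h x hx
      exact h x (List.mem_cons_of_mem _ hx) d (by simp)

-- A reduces to allSame of the gaps of the '1'-positions of the scanned prefix
theorem checkA_eq (s : String) (l : Int) (hpre : l ≤ (s.toList.length : Int)) :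
    check s l = allSame (diffs (onesIdx (s.toList.take l.toNat))) := by
  unfold check
  dsimp only
  by_cases hneg : l < 0
  · rw [PySem.List.pyRange_one_eq_nil (by omega : l ≤ (0:Int))]
    simp only [List.foldl_nil, List.length_nil, Nat.cast_zero]
    rw [PySem.List.pyRange_one_eq_nil (by norm_num)]
    have h0 : l.toNat = 0 := by omega
    rw [h0]
    rfl
  · rw [Int.not_lt] at hneg
    have hmlen : l.toNat ≤ s.toList.length := by omega
    have hm : l = ((l.toNat : Nat) : Int) := by omega
    rw [hm, PySem.List.pyRange_zero_natCast, Int.toNat_natCast]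
    have hfun : (fun (acc : List Int) (i : Int) =>
        if PySem.List.pyGetD s.toList i ' ' = '1' then acc ++ [i] else acc)
        = (fun (acc : List Int) (i : Int) =>
          if (fun x : Int => decide (PySem.List.pyGetD s.toList x ' ' = '1')) i = true
          then acc ++ [(id i : Int)] else acc) := by
      funext acc i
      simp only [decide_eq_true_eq, id]
    rw [hfun, PySem.List.foldl_append_if, List.nil_append, List.map_id, List.filter_map]
    rw [List.filter_congr (fun i hi => by
      have hilt : i < l.toNat := List.mem_range.mp hi
      show decide (PySem.List.pyGetD s.toList ((i : Nat) : Int) ' ' = '1')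
          = ((s.toList.take l.toNat).getD i ' ' == '1')
      rw [PySem.List.pyGetD_natCast]
      simp [List.getD, hilt, Bool.beq_eq_decide_eq])]
    have hlen : (s.toList.take l.toNat).length = l.toNat := by
      rw [List.length_take]
      exact min_eq_left hmlen
    have hQ : (List.range l.toNat).filter (fun i => (s.toList.take l.toNat).getD i ' ' == '1')
        = onesIdx (s.toList.take l.toNat) := by
      unfold onesIdx
      rw [hlen]
    rw [hQ]
    have hsort := onesIdx_sorted (s.toList.take l.toNat)
    rcases hM : onesIdx (s.toList.take l.toNat) with _ | ⟨q0, _ | ⟨q1, qs⟩⟩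
    · simp only [List.length_map, List.length_nil, Nat.cast_zero]
      rw [PySem.List.pyRange_one_eq_nil (by norm_num)]
      rfl
    · simp only [List.length_map, List.length_cons, List.length_nil]
      norm_num
      rfl
    · rw [hM] at hsort
      simp only [List.map_cons]
      rw [chainA_cons]
      have hg : ((q1 : Int) - (q0 : Int)) = ((q1 - q0 : Nat) : Int) := by
        have : q0 < q1 := (List.pairwise_cons.mp hsort).1 q1 (by simp)
        omega
      rw [hg, ← List.map_cons, allEq_cast (q1 - q0) (q1 :: qs) q0 hsort]
      simp [diffs, allSame]

-- B reduces to pairwise equality of the inner segment lengths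
theorem checkB_iff (s : String) (l : Int) (h2 : 2 ≤ l) :
    check_alt s l = true ↔ pairwiseEq
      (((mySplit (s.toList.take l.toNat)).tail.dropLast).map (fun p => (p.length : Int))) := by
  unfold check_alt
  rw [if_neg (by omega)]
  dsimp only
  have hm : l = ((l.toNat : Nat) : Int) := by omega
  rw [hm, PySem.List.slice_to_natCast, Int.toNat_natCast, splitOn_eq_mySplit, slice_one_negone]
  simp only [decide_eq_true_eq]
  exact setLen_le_one_iff _

-- the bridge on a fixed prefix u
theorem core_iff (u : List Char) :
    allSame (diffs (onesIdx u)) = true ↔ pairwiseEq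
      (((mySplit u).tail.dropLast).map (fun p => (p.length : Int))) := by
  rw [onesIdx_eq_posOf, diffs_posOf, allSame_iff, pairwiseEq_map, pairwiseEq_map]
  constructor <;> intro h a ha b hb <;> have := h a ha b hb <;> omega

-- small l: at most one '1', both sides trivially true
theorem checkA_small (s : String) (l : Int) (hl : l < 2) (hpre : l ≤ (s.toList.length : Int)) :
    check s l = true := by
  rw [checkA_eq s l hpre]
  have h1 : (onesIdx (s.toList.take l.toNat)).length ≤ 1 := by
    have h2 := List.length_filter_le (fun i => (s.toList.take l.toNat).getD i ' ' == '1')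
      (List.range (s.toList.take l.toNat).length)
    simp only [List.length_range, List.length_take] at h2
    unfold onesIdx
    simp only [List.length_take] at h2 ⊢
    omega
  rcases hQ : onesIdx (s.toList.take l.toNat) with _ | ⟨q, _ | ⟨q2, qs⟩⟩
  · rfl
  · rfl
  · rw [hQ] at h1; simp at h1

-- ===== VERDICT (by name: the statement is the Claim_ definition above) =====
theorem check_spec : Claim_equal_check := by
  intro s l _ hpre
  unfold Spec_check
  by_cases h2 : l < 2
  · rw [checkA_small s l h2 hpre]
    simp [check_alt, h2]
  · rw [checkA_eq s l hpre]
    exact Bool.eq_iff_iff.mpr ((core_iff _).trans (checkB_iff s l (by omega)).symm)
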